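-- pv_equiv track=rewrite | github.com/ramizik/stealthD | analytics/simple_player_ball_assigner.py | count_player_touches
-- ===== SOURCE A (Python) =====
-- from typing import Dict
--
-- def count_player_touches(ball_assignments: Dict[int, int]) -> Dict[int, int]:
--     """
--     Count touches from frame-by-frame assignments.
--
--     A touch is counted when ball is assigned to a new player.
--
--     Args:
--         ball_assignments: Dictionary {frame_idx: player_id}
--
--     Returns:
--         Dictionary {player_id: touch_count}
--     """
--     touches = {}
--     prev_player = None
--
--     sorted_frames = sorted(ball_assignments.keys())
--
--     for frame_idx in sorted_frames:
--         current_player = ball_assignments[frame_idx]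
--
--         if current_player != prev_player and current_player is not None:
--             if current_player not in touches:
--                 touches[current_player] = 0
--             touches[current_player] += 1
--
--         prev_player = current_player
--
--     return touches
-- ===== SOURCE B (Python) =====
-- from typing import Dict
--
-- def count_player_touches(ball_assignments: Dict[int, int]) -> Dict[int, int]:
--     """Count touches arithmetically: touches(p) = occurrences of p in the
--     sorted-frame player sequence minus the number of adjacent equal pairs (p, p),
--     since each maximal run of p contributes exactly one touch."""
--     players = [ball_assignments[f] for f in sorted(ball_assignments)]
--     total = {}
--     for p in players:
--         total[p] = total.get(p, 0) + 1
--     rep = {}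
--     for a, b in zip(players, players[1:]):
--         if a == b:
--             rep[a] = rep.get(a, 0) + 1
--     return {p: total[p] - rep.get(p, 0) for p in total if p is not None}
-- ===== Notes on version B (the rewrite author's own statement) =====
-- stated objective: alternative
-- what changed: Replaces A's stateful prev_player transition detection by a counting identity: build occurrence counts and adjacent-equal-pair counts of the sorted-frame player sequence in two independent passes, then derive touches(p) = occurrences(p) - adjacent-equal-pairs(p), since each maximal run contributes exactly one touch.
import Mathlib
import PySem

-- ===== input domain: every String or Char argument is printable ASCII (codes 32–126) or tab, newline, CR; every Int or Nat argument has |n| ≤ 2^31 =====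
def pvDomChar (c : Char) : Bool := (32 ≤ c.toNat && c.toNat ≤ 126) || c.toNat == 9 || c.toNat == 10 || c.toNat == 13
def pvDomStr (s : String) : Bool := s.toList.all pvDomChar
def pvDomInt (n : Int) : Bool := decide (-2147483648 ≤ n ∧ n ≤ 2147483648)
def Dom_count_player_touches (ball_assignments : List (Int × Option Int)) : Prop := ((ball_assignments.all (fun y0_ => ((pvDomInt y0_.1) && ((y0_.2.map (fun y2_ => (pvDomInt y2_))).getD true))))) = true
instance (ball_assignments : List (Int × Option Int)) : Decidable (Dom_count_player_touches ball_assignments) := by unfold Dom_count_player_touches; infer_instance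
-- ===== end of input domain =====

-- B replaces A's prev-player transition tracking by a counting identity: touches(p)
-- = occurrences of p in the sorted player sequence minus adjacent equal pairs (p,p).

-- ===== PORT A =====
-- the touch-increment of A: 'if current not in touches: touches[current] = 0; touches[current] += 1'
def cptBumpA (t : PySem.Dict Int Int) (q : Int) : PySem.Dict Int Int :=
  let t1 := if t.contains q then t else t.insert q 0
  t1.insert q (t1.getD q 0 + 1)

-- A's loop body: state = (touches, prev_player); 'if current != prev and current is not None'
def cptStepA (st : PySem.Dict Int Int × Option Int) (c : Option Int) :
    PySem.Dict Int Int × Option Int :=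
  match c with
  | none => (st.1, none)
  | some q => if some q ≠ st.2 then (cptBumpA st.1 q, some q) else (st.1, some q)

def count_player_touches (ball_assignments : List (Int × Option Int)) : List (Int × Int) :=
  let d := PySem.Dict.mk ball_assignments
  let sorted_frames := PySem.List.sorted d.keys (fun x => x) false
  (sorted_frames.foldl (fun st f => cptStepA st (d.getD f none)) (PySem.Dict.empty, none)).1.items

-- ===== PORT B =====
def count_player_touches_alt (ball_assignments : List (Int × Option Int)) : List (Int × Int) :=
  let d := PySem.Dict.mk ball_assignments
  let players := (PySem.List.sorted d.keys (fun x => x) false).map (fun f => d.getD f none)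
  -- 'for p in players: total[p] = total.get(p, 0) + 1'
  let total := players.foldl (fun t p => t.insert p (t.getD p 0 + 1)) PySem.Dict.empty
  -- 'for a, b in zip(players, players[1:]): if a == b: rep[a] = rep.get(a, 0) + 1'
  let rep := (players.zip players.tail).foldl
    (fun t ab => if ab.1 = ab.2 then t.insert ab.1 (t.getD ab.1 0 + 1) else t) PySem.Dict.empty
  -- '{p: total[p] - rep.get(p, 0) for p in total if p is not None}'
  (total.keys.foldl (fun t p =>
      match p with
      | none => t
      | some q => t.insert q (total.getD (some q) 0 - rep.getD (some q) 0))
    PySem.Dict.empty).items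

-- ===== PRECONDITION & SPEC =====
def Spec_count_player_touches (ball_assignments : List (Int × Option Int)) (out : List (Int × Int)) : Prop := out = count_player_touches_alt ball_assignments
instance (ball_assignments : List (Int × Option Int)) (out : List (Int × Int)) : Decidable (Spec_count_player_touches ball_assignments out) := by unfold Spec_count_player_touches; infer_instance

-- ===== CLAIM (what is proved, stated in full; the proofs are below) =====
def Claim_equal_count_player_touches : Prop := ∀ (ball_assignments : List (Int × Option Int)), Dom_count_player_touches ball_assignments → Spec_count_player_touches ball_assignments (count_player_touches ball_assignments)

-- ===== LEMMAS AND PROOFS =====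

-- run heads of the player sequence: first element of every maximal run of equal values
def cptCollapse : List (Option Int) → List (Option Int)
  | [] => []
  | [a] => [a]
  | a :: b :: r => if a = b then cptCollapse (b :: r) else a :: cptCollapse (b :: r)

-- drop the head of l when it equals prev (a run already consumed by A's prev state)
def cptDrop (prev : Option Int) : List (Option Int) → List (Option Int)
  | [] => []
  | a :: r => if a = prev then r else a :: r

-- counting a run head: skip None, bump the player's counter
def cptStepB (t : PySem.Dict Int Int) (p : Option Int) : PySem.Dict Int Int :=
  match p with
  | none => t
  | some q => t.insert q (t.getD q 0 + 1)

-- the adjacent equal pairs of l, as the repeated value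
def cptEqs (l : List (Option Int)) : List (Option Int) :=
  (l.zip l.tail).filterMap (fun ab => if ab.1 = ab.2 then some ab.1 else none)

-- B's three loops, written point-free (definitionally the body of the alt port)
def cptTotal (ps : List (Option Int)) : PySem.Dict (Option Int) Int :=
  ps.foldl (fun t p => t.insert p (t.getD p 0 + 1)) PySem.Dict.empty

def cptRepD (ps : List (Option Int)) : PySem.Dict (Option Int) Int :=
  (ps.zip ps.tail).foldl
    (fun t ab => if ab.1 = ab.2 then t.insert ab.1 (t.getD ab.1 0 + 1) else t) PySem.Dict.empty

def cptBItems (ps : List (Option Int)) : List (Int × Int) :=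
  ((cptTotal ps).keys.foldl (fun t p =>
      match p with
      | none => t
      | some q => t.insert q ((cptTotal ps).getD (some q) 0 - (cptRepD ps).getD (some q) 0))
    PySem.Dict.empty).items

lemma cptBumpA_eq (t : PySem.Dict Int Int) (q : Int) :
    cptBumpA t q = t.insert q (t.getD q 0 + 1) := by
  unfold cptBumpA
  by_cases h : t.contains q = true
  · simp [h]
  · have h' : t.contains q = false := by simpa using h
    have hg : t.getD q 0 = 0 := by simp [PySem.Dict.getD_of_not_contains, h']
    simp [h', PySem.Dict.insert_insert_self, hg]

lemma cptCollapse_cons_head (r : List (Option Int)) (b : Option Int) :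
    ∃ t, cptCollapse (b :: r) = b :: t := by
  induction r generalizing b with
  | nil => exact ⟨[], rfl⟩
  | cons x r2 ih =>
    obtain ⟨t, ht⟩ := ih x
    by_cases h : b = x
    · subst h; exact ⟨t, by simp [cptCollapse, ht]⟩
    · exact ⟨cptCollapse (x :: r2), by simp [cptCollapse, h]⟩

lemma cptCollapse_cons (c : Option Int) (r : List (Option Int)) :
    cptCollapse (c :: r) = c :: cptDrop c (cptCollapse r) := by
  cases r with
  | nil => rfl
  | cons b r' =>
    obtain ⟨t, ht⟩ := cptCollapse_cons_head r' b
    by_cases h : c = b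
    · subst h; simp [cptCollapse, ht, cptDrop]
    · simp [cptCollapse, h, ht, cptDrop, Ne.symm h]

-- A's fold, with its prev state, is cptStepB over the run heads not yet consumed
lemma cpt_main (ps : List (Option Int)) :
    ∀ (t : PySem.Dict Int Int) (prev : Option Int),
      (ps.foldl cptStepA (t, prev)).1 = (cptDrop prev (cptCollapse ps)).foldl cptStepB t := by
  induction ps with
  | nil => intro t prev; rfl
  | cons c rest ih =>
    intro t prev
    rw [cptCollapse_cons]
    by_cases h : c = prev
    · subst h
      have hstep : cptStepA (t, c) c = (t, c) := by
        cases c with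
        | none => rfl
        | some q => simp [cptStepA]
      simp only [List.foldl_cons, hstep, cptDrop]
      exact ih t c
    · have hstep : cptStepA (t, prev) c = (cptStepB t c, c) := by
        cases c with
        | none => rfl
        | some q => simp [cptStepA, cptStepB, h, cptBumpA_eq]
      simp only [List.foldl_cons, hstep, cptDrop, if_neg h]
      exact ih (cptStepB t c) c

lemma cptDrop_none_foldl (l : List (Option Int)) (t : PySem.Dict Int Int) :
    (cptDrop none l).foldl cptStepB t = l.foldl cptStepB t := by
  cases l with
  | nil => rfl
  | cons a r =>
    cases a with
    | none => simp [cptDrop, cptStepB]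
    | some q => simp [cptDrop]

-- cptStepB over a list = the counter step over its non-None values
lemma cptStepB_filterMap (l : List (Option Int)) :
    ∀ t, l.foldl cptStepB t
      = (l.filterMap id).foldl (fun t q => t.insert q (t.getD q 0 + 1)) t := by
  induction l with
  | nil => intro t; rfl
  | cons a r ih =>
    intro t
    cases a with
    | none =>
      rw [List.filterMap_cons_none (f := (id : Option Int → Option Int)) rfl, List.foldl_cons]
      exact ih t
    | some q =>
      rw [List.filterMap_cons_some (f := (id : Option Int → Option Int)) rfl, List.foldl_cons, List.foldl_cons]
      exact ih (t.insert q (t.getD q 0 + 1))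

-- B's rep loop = the counter step over the repeated values
lemma cptRep_filterMap (l : List (Option Int × Option Int)) :
    ∀ t : PySem.Dict (Option Int) Int,
      l.foldl (fun t ab => if ab.1 = ab.2 then t.insert ab.1 (t.getD ab.1 0 + 1) else t) t
      = (l.filterMap (fun ab => if ab.1 = ab.2 then some ab.1 else none)).foldl
          (fun t x => t.insert x (t.getD x 0 + 1)) t := by
  induction l with
  | nil => intro t; rfl
  | cons a r ih =>
    intro t
    by_cases h : a.1 = a.2
    · rw [List.filterMap_cons_some
          (f := fun ab : Option Int × Option Int => if ab.1 = ab.2 then some ab.1 else none)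
          (b := a.1) (by simp [h]), List.foldl_cons, List.foldl_cons, if_pos h]
      exact ih (t.insert a.1 (t.getD a.1 0 + 1))
    · rw [List.filterMap_cons_none
          (f := fun ab : Option Int × Option Int => if ab.1 = ab.2 then some ab.1 else none)
          (by simp [h]), List.foldl_cons, if_neg h]
      exact ih t

-- B's emit loop skips None keys
lemma cptEmit_filterMap (F : Int → Int) (ks : List (Option Int)) :
    ∀ t : PySem.Dict Int Int,
      ks.foldl (fun t p => match p with | none => t | some q => t.insert q (F q)) t
      = (ks.filterMap id).foldl (fun t q => t.insert q (F q)) t := by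
  induction ks with
  | nil => intro t; rfl
  | cons a r ih =>
    intro t
    cases a with
    | none =>
      rw [List.filterMap_cons_none (f := (id : Option Int → Option Int)) rfl, List.foldl_cons]
      exact ih t
    | some q =>
      rw [List.filterMap_cons_some (f := (id : Option Int → Option Int)) rfl, List.foldl_cons, List.foldl_cons]
      exact ih (t.insert q (F q))

lemma cpt_count_filterMap_id (l : List (Option Int)) (q : Int) :
    (l.filterMap id).count q = l.count (some q) := by
  induction l with
  | nil => rfl
  | cons a r ih =>
    cases a with
    | none =>
      rw [List.filterMap_cons_none (f := (id : Option Int → Option Int)) rfl, List.count_cons_of_ne (by simp)]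
      exact ih
    | some x =>
      rw [List.filterMap_cons_some (f := (id : Option Int → Option Int)) rfl, List.count_cons, List.count_cons, ih]
      by_cases h : x = q
      · simp [h]
      · simp [h]

lemma cpt_filterMap_discard_none (s : List (Option Int)) :
    (PySem.Set.discard s none).filterMap id = s.filterMap id := by
  induction s with
  | nil => rfl
  | cons a r ih =>
    cases a with
    | none =>
      rw [show PySem.Set.discard (none :: r) none = PySem.Set.discard r none from by
        simp [PySem.Set.discard], ih, List.filterMap_cons_none (f := (id : Option Int → Option Int)) rfl]
    | some x =>
      rw [show PySem.Set.discard (some x :: r) none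
            = some x :: PySem.Set.discard r none from by simp [PySem.Set.discard],
        List.filterMap_cons_some (f := (id : Option Int → Option Int)) rfl, List.filterMap_cons_some (f := (id : Option Int → Option Int)) rfl, ih]

lemma cpt_filterMap_discard_some (s : List (Option Int)) (q : Int) :
    (PySem.Set.discard s (some q)).filterMap id
      = PySem.Set.discard (s.filterMap id) q := by
  induction s with
  | nil => rfl
  | cons a r ih =>
    cases a with
    | none =>
      rw [show PySem.Set.discard (none :: r) (some q)
            = none :: PySem.Set.discard r (some q) from by simp [PySem.Set.discard],
        List.filterMap_cons_none (f := (id : Option Int → Option Int)) rfl, List.filterMap_cons_none (f := (id : Option Int → Option Int)) rfl, ih]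
    | some x =>
      by_cases h : x = q
      · subst h
        rw [show PySem.Set.discard (some x :: r) (some x)
              = PySem.Set.discard r (some x) from by simp [PySem.Set.discard],
          List.filterMap_cons_some (f := (id : Option Int → Option Int)) rfl, ih,
          show PySem.Set.discard (x :: List.filterMap id r) x
              = PySem.Set.discard (List.filterMap id r) x from by simp [PySem.Set.discard]]
      · rw [show PySem.Set.discard (some x :: r) (some q)
              = some x :: PySem.Set.discard r (some q) from by simp [PySem.Set.discard, h],
          List.filterMap_cons_some (f := (id : Option Int → Option Int)) rfl, List.filterMap_cons_some (f := (id : Option Int → Option Int)) rfl, ih,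
          show PySem.Set.discard (x :: List.filterMap id r) q
              = x :: PySem.Set.discard (List.filterMap id r) q from by
            simp [PySem.Set.discard, h]]

-- set(·) commutes with extracting the non-None values
lemma cpt_ofList_filterMap (l : List (Option Int)) :
    PySem.Set.ofList (l.filterMap id) = (PySem.Set.ofList l).filterMap id := by
  induction l with
  | nil => rfl
  | cons a r ih =>
    cases a with
    | none =>
      rw [List.filterMap_cons_none (f := (id : Option Int → Option Int)) rfl, ih, PySem.Set.ofList_cons,
        List.filterMap_cons_none (f := (id : Option Int → Option Int)) rfl, cpt_filterMap_discard_none]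
    | some x =>
      rw [List.filterMap_cons_some (f := (id : Option Int → Option Int)) rfl, PySem.Set.ofList_cons, ih,
        PySem.Set.ofList_cons, List.filterMap_cons_some (f := (id : Option Int → Option Int)) rfl,
        cpt_filterMap_discard_some]

lemma cpt_discard_cptDrop (c : Option Int) (x : List (Option Int)) :
    PySem.Set.discard (PySem.Set.ofList (cptDrop c x)) c
      = PySem.Set.discard (PySem.Set.ofList x) c := by
  cases x with
  | nil => rfl
  | cons h t =>
    by_cases hc : h = c
    · subst hc
      simp [cptDrop, PySem.Set.ofList_cons, PySem.Set.discard, List.filter_filter]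
    · simp [cptDrop, hc]

-- collapsing runs does not change the set of values (first occurrences survive)
lemma cpt_ofList_collapse (l : List (Option Int)) :
    PySem.Set.ofList (cptCollapse l) = PySem.Set.ofList l := by
  induction l with
  | nil => rfl
  | cons c r ih =>
    rw [cptCollapse_cons, PySem.Set.ofList_cons, cpt_discard_cptDrop, ih,
      PySem.Set.ofList_cons]

-- the counting identity: runs of v = occurrences of v − adjacent equal pairs (v, v)
lemma cpt_count_identity (l : List (Option Int)) (v : Option Int) :
    (cptCollapse l).count v + (cptEqs l).count v = l.count v := by
  induction l with
  | nil => rfl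
  | cons a r ih =>
    cases r with
    | nil => simp [cptCollapse, cptEqs]
    | cons b r' =>
      by_cases h : a = b
      · subst h
        have hcol : cptCollapse (a :: a :: r') = cptCollapse (a :: r') := by
          simp [cptCollapse]
        have heq : cptEqs (a :: a :: r') = a :: cptEqs (a :: r') := by
          simp [cptEqs]
        rw [hcol, heq, List.count_cons, List.count_cons]
        omega
      · have hcol : cptCollapse (a :: b :: r') = a :: cptCollapse (b :: r') := by
          simp [cptCollapse, h]
        have heq : cptEqs (a :: b :: r') = cptEqs (b :: r') := by
          simp [cptEqs, h]
        rw [hcol, heq, List.count_cons, List.count_cons]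
        omega

-- the heart of the file: A's fold and B's three loops produce the same items list
lemma cpt_key' (ps : List (Option Int)) :
    (ps.foldl cptStepA (PySem.Dict.empty, none)).1.items = cptBItems ps := by
  unfold cptBItems cptTotal cptRepD
  rw [cpt_main, cptDrop_none_foldl, cptStepB_filterMap,
    PySem.Dict.foldl_insert_getD_add_one_eq_counter, PySem.Dict.items_counter]
  rw [PySem.Dict.foldl_insert_getD_add_one_eq_counter, cptRep_filterMap,
    PySem.Dict.foldl_insert_getD_add_one_eq_counter,
    cptEmit_filterMap (F := fun q => ((PySem.Dict.counter ps).getD (some q) 0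
      - (PySem.Dict.counter (List.filterMap (fun ab : Option Int × Option Int =>
          if ab.1 = ab.2 then some ab.1 else none) (ps.zip ps.tail))).getD (some q) 0)),
    PySem.Dict.keys_counter]
  have hnodupS : (PySem.Set.ofList ps).Nodup := PySem.Set.nodup_ofList ps
  have hnodup : ((PySem.Set.ofList ps).filterMap id).Nodup :=
    List.Nodup.filterMap (f := (id : Option Int → Option Int))
      (fun a a' b hb hb' => by cases a <;> cases a' <;> simp_all) hnodupS
  have hB := PySem.Dict.items_foldl_insert_fresh
    (l := (PySem.Set.ofList ps).filterMap id) (k := fun q => q)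
    (v := fun q => ((PySem.Dict.counter ps).getD (some q) 0
      - (PySem.Dict.counter (List.filterMap (fun ab : Option Int × Option Int =>
          if ab.1 = ab.2 then some ab.1 else none) (ps.zip ps.tail))).getD (some q) 0))
    (d := PySem.Dict.empty)
    (by intro a _; simp) (by simpa using hnodup)
  rw [hB, show (PySem.Dict.empty : PySem.Dict Int Int).items = [] from rfl,
    List.nil_append]
  rw [cpt_ofList_filterMap, cpt_ofList_collapse]
  refine List.map_congr_left ?_
  intro k _
  have hcnt := cpt_count_identity ps (some k)
  unfold cptEqs at hcnt
  rw [cpt_count_filterMap_id]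
  simp only [PySem.Dict.getD_counter, Prod.mk.injEq, true_and]
  omega

-- instantiation at the sorted-frame sequence, in the exact shape of the two ports
lemma cpt_key (d : PySem.Dict Int (Option Int)) (fs : List Int) :
    (fs.foldl (fun st f => cptStepA st (d.getD f none)) (PySem.Dict.empty, none)).1.items
      = cptBItems (fs.map (fun f => d.getD f none)) := by
  rw [← List.foldl_map, cpt_key']

-- ===== VERDICT (by name: the statement is the Claim_ definition above) =====
theorem count_player_touches_spec : Claim_equal_count_player_touches := by
  intro ba _
  exact cpt_key (PySem.Dict.mk ba)
    (PySem.List.sorted (PySem.Dict.mk ba).keys (fun x => x) false)
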